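-- pv_equiv track=rewrite | github.com/chloeboireaudevier/AOC-2024 | day5.py | get_correctly_ordered
-- ===== SOURCE A (Python) =====
-- def is_ordered_page(rules,index_page,updated_pages):
--     for rule in rules:
--         if rule[0] == updated_pages[index_page]:
--             for i in range(index_page):
--                 if updated_pages[i] == rule[1]:
--                     return False
--     return True
--
-- def is_ordered_list(rules,list_pages):
--     for i in range(len(list_pages)):
--         if not is_ordered_page(rules,i,list_pages):
--             return False
--     return True
--
-- def get_correctly_ordered(rules,array_pages):
--     ordered = []
--     unordered = []
--     for list_pages in array_pages:
--         if is_ordered_list(rules,list_pages):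
--             ordered.append(list_pages)
--         else:
--             unordered.append(list_pages)
--     return ordered,unordered
-- ===== SOURCE B (Python) =====
-- def get_correctly_ordered(rules, array_pages):
--     def violates(pages, a, b):
--         # one forward pass: has some b already been seen when we meet an a?
--         seen_b = False
--         for p in pages:
--             if seen_b and p == a:
--                 return True
--             if p == b:
--                 seen_b = True
--         return False
--     ordered = []
--     unordered = []
--     for pages in array_pages:
--         if any(violates(pages, a, b) for (a, b) in rules):
--             unordered.append(pages)
--         else:
--             ordered.append(pages)
--     return ordered, unordered
-- ===== Notes on version B (the rewrite author's own statement) =====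
-- stated objective: faster
-- what changed: B tests each rule with a single forward pass over the page list carrying a seen-b flag (rules outer, one pass per rule), instead of A's per-position loop that re-scans the rules and the whole prefix at every index.
import Mathlib
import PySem

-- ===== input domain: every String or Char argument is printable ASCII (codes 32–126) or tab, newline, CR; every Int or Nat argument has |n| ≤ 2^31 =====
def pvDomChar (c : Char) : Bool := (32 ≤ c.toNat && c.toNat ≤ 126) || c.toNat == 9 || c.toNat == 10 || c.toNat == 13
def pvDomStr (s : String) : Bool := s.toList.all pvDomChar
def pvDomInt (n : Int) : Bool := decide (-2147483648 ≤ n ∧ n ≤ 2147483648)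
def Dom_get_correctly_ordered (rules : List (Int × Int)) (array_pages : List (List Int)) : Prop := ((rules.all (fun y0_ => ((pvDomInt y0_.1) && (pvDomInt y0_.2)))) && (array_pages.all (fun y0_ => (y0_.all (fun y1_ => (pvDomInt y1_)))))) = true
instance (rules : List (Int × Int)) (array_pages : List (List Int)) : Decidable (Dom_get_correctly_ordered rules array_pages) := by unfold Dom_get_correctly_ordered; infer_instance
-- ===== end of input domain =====

-- B: one forward pass per rule with a seen-flag replaces A's per-position prefix re-scan; same return value.

-- ===== PORT A =====
def is_ordered_page (rules : List (Int × Int)) (index_page : Int) (updated_pages : List Int) : Bool :=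
  rules.all fun rule =>
    if PySem.List.pyGet? updated_pages index_page == some rule.1 then
      (PySem.List.pyRange 0 index_page 1).all fun i =>
        !(PySem.List.pyGet? updated_pages i == some rule.2)
    else true

def is_ordered_list (rules : List (Int × Int)) (list_pages : List Int) : Bool :=
  (PySem.List.pyRange 0 (list_pages.length : Int) 1).all fun i =>
    is_ordered_page rules i list_pages

def get_correctly_ordered (rules : List (Int × Int)) (array_pages : List (List Int)) : List (List Int) × List (List Int) :=
  array_pages.foldl
    (fun acc list_pages =>
      if is_ordered_list rules list_pages then (acc.1 ++ [list_pages], acc.2)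
      else (acc.1, acc.2 ++ [list_pages]))
    ([], [])

-- ===== PORT B =====
def violatesGo (a b : Int) (seen_b : Bool) : List Int → Bool
  | [] => false
  | p :: rest =>
    if seen_b && (p == a) then true
    else violatesGo a b (seen_b || (p == b)) rest

def violates (pages : List Int) (a b : Int) : Bool :=
  violatesGo a b false pages

def get_correctly_ordered_alt (rules : List (Int × Int)) (array_pages : List (List Int)) : List (List Int) × List (List Int) :=
  array_pages.foldl
    (fun acc pages =>
      if rules.any (fun r => violates pages r.1 r.2) then (acc.1, acc.2 ++ [pages])
      else (acc.1 ++ [pages], acc.2))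
    ([], [])

-- ===== PRECONDITION & SPEC =====
def Spec_get_correctly_ordered (rules : List (Int × Int)) (array_pages : List (List Int)) (out : List (List Int) × List (List Int)) : Prop := out = get_correctly_ordered_alt rules array_pages
instance (rules : List (Int × Int)) (array_pages : List (List Int)) (out : List (List Int) × List (List Int)) : Decidable (Spec_get_correctly_ordered rules array_pages out) := by unfold Spec_get_correctly_ordered; infer_instance

-- ===== CLAIM (what is proved, stated in full; the proofs are below) =====
def Claim_equal_get_correctly_ordered : Prop := ∀ (rules : List (Int × Int)) (array_pages : List (List Int)), Dom_get_correctly_ordered rules array_pages → Spec_get_correctly_ordered rules array_pages (get_correctly_ordered rules array_pages)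

-- ===== LEMMAS AND PROOFS =====

-- 'Bad a b pages': some occurrence of b strictly precedes some occurrence of a — the violation both programs detect.
def Bad (a b : Int) (pages : List Int) : Prop :=
  ∃ i j : Nat, j < i ∧ pages[j]? = some b ∧ pages[i]? = some a

theorem mem_range01 (n : Nat) (x : Int) :
    x ∈ PySem.List.pyRange 0 (n : Int) 1 ↔ ∃ k : Nat, k < n ∧ x = (k : Int) := by
  rw [PySem.List.mem_pyRange_one]
  constructor
  · rintro ⟨h0, hn⟩
    exact ⟨x.toNat, by omega, by omega⟩
  · rintro ⟨k, hk, rfl⟩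
    constructor <;> omega

theorem violatesGo_true (a b : Int) (l : List Int) :
    violatesGo a b true l = l.contains a := by
  induction l with
  | nil => rfl
  | cons p rest ih =>
    simp only [violatesGo, Bool.true_and, List.contains_cons]
    by_cases h : p = a
    · simp [h]
    · simp [h, ih, Ne.symm h]

theorem violates_iff (a b : Int) (l : List Int) :
    violates l a b = true ↔ Bad a b l := by
  induction l with
  | nil => simp [violates, violatesGo, Bad]
  | cons p rest ih =>
    have hstep : violates (p :: rest) a b = violatesGo a b (p == b) rest := by
      simp [violates, violatesGo]
    rw [hstep]
    by_cases hb : p = b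
    · subst hb
      rw [beq_self_eq_true, violatesGo_true]
      constructor
      · intro h
        rcases List.mem_iff_getElem?.mp (by simpa using h) with ⟨k, hk⟩
        exact ⟨k+1, 0, Nat.succ_pos _, by simp, by simpa using hk⟩
      · rintro ⟨i, j, hji, hjb, hia⟩
        obtain ⟨i', rfl⟩ : ∃ i', i = i'+1 := ⟨i-1, by omega⟩
        simp only [List.getElem?_cons_succ] at hia
        simpa using List.mem_iff_getElem?.mpr ⟨i', hia⟩
    · rw [beq_eq_false_iff_ne.mpr hb]
      rw [show violatesGo a b false rest = violates rest a b from rfl, ih]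
      constructor
      · rintro ⟨i, j, hji, hjb, hia⟩
        exact ⟨i+1, j+1, by omega, by simpa, by simpa⟩
      · rintro ⟨i, j, hji, hjb, hia⟩
        match j, i with
        | 0, i => simp at hjb; exact (hb hjb).elim
        | j+1, 0 => omega
        | j+1, i+1 =>
          exact ⟨i, j, by omega, by simpa using hjb, by simpa using hia⟩

theorem is_ordered_page_iff (rules : List (Int × Int)) (i : Nat) (l : List Int) :
    is_ordered_page rules (i : Int) l = true ↔
      ∀ r ∈ rules, l[i]? = some r.1 → ∀ j : Nat, j < i → l[j]? ≠ some r.2 := by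
  simp only [is_ordered_page, List.all_eq_true]
  refine forall_congr' fun r => forall_congr' fun hr => ?_
  rw [PySem.List.pyGet?_natCast]
  by_cases hi : l[i]? = some r.1
  · simp only [hi, beq_self_eq_true, if_true, List.all_eq_true, true_implies]
    constructor
    · intro h j hj
      have := h (j : Int) ((mem_range01 i (j : Int)).mpr ⟨j, hj, rfl⟩)
      rw [PySem.List.pyGet?_natCast] at this
      simpa using this
    · intro h x hx
      rcases (mem_range01 i x).mp hx with ⟨j, hj, rfl⟩
      rw [PySem.List.pyGet?_natCast]
      simpa using h j hj
  · simp [hi]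

theorem is_ordered_list_iff (rules : List (Int × Int)) (l : List Int) :
    is_ordered_list rules l = true ↔ ∀ r ∈ rules, ¬ Bad r.1 r.2 l := by
  simp only [is_ordered_list, List.all_eq_true]
  constructor
  · rintro h r hr ⟨i, j, hji, hjb, hia⟩
    have hi : i < l.length := (List.getElem?_eq_some_iff.mp hia).1
    have hp := h (i : Int) ((mem_range01 l.length (i : Int)).mpr ⟨i, hi, rfl⟩)
    rw [is_ordered_page_iff] at hp
    exact hp r hr hia j hji hjb
  · intro h x hx
    rcases (mem_range01 l.length x).mp hx with ⟨i, hi, rfl⟩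
    rw [is_ordered_page_iff]
    intro r hr hia j hj hjb
    exact h r hr ⟨i, j, hj, hjb, hia⟩

theorem ordered_eq_not_any (rules : List (Int × Int)) (l : List Int) :
    is_ordered_list rules l = !(rules.any fun r => violates l r.1 r.2) := by
  by_cases h : ∀ r ∈ rules, ¬ Bad r.1 r.2 l
  · have h1 := (is_ordered_list_iff rules l).mpr h
    have h2 : (rules.any fun r => violates l r.1 r.2) = false := by
      rw [List.any_eq_false]
      intro r hr
      rw [Bool.not_eq_true, Bool.eq_false_iff]
      intro hv
      exact h r hr ((violates_iff r.1 r.2 l).mp hv)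
    rw [h1, h2]; rfl
  · push Not at h
    rcases h with ⟨r, hr, hbad⟩
    have h2 : (rules.any fun r => violates l r.1 r.2) = true :=
      List.any_eq_true.mpr ⟨r, hr, (violates_iff r.1 r.2 l).mpr hbad⟩
    have h1 : is_ordered_list rules l = false := by
      rw [Bool.eq_false_iff]
      intro hT
      exact ((is_ordered_list_iff rules l).mp hT) r hr hbad
    rw [h1, h2]; rfl

-- ===== VERDICT (by name: the statement is the Claim_ definition above) =====
theorem get_correctly_ordered_spec : Claim_equal_get_correctly_ordered := by
  intro rules array_pages _
  unfold Spec_get_correctly_ordered get_correctly_ordered get_correctly_ordered_alt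
  congr 1
  funext acc pages
  rw [ordered_eq_not_any]
  cases rules.any (fun r => violates pages r.1 r.2) <;> simp
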